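-- pv_equiv track=rewrite | github.com/AdeThorn/comp-598 | homework8/src/compile_word_counts.py | words_more5
-- ===== SOURCE A (Python) =====
-- def words_more5(pony_wc):
--
--     sus_words = {}
--     for pony in pony_wc:
--         for word in pony_wc[pony]:
--             if pony_wc[pony][word] < 5:
--                 if word not in sus_words:
--                     sus_words[word] = pony_wc[pony][word]
--                 else:
--                     sus_words[word] += pony_wc[pony][word]
--
--     #remove words from pony_wc if appear less than 5 times
--     for word in sus_words:
--         if sus_words[word] < 5:
--             for pony in pony_wc:
--                 if word in pony_wc[pony]:
--                     pony_wc[pony].pop(word)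
--     return pony_wc
-- ===== SOURCE B (Python) =====
-- def words_more5(pony_wc):
--     # One pass to total the sub-5 counts per word, then one rebuilding pass that
--     # filters every pony's dict against the set of removed words (no per-word scan
--     # over all ponies).  Returns a new dict; unlike A it does not mutate pony_wc.
--     sums = {}
--     for wc in pony_wc.values():
--         for w, c in wc.items():
--             if c < 5:
--                 sums[w] = sums.get(w, 0) + c
--     removed = {w for w, s in sums.items() if s < 5}
--     return {pony: {w: c for w, c in wc.items() if w not in removed}
--             for pony, wc in pony_wc.items()}
-- ===== Notes on version B (the rewrite author's own statement) =====
-- stated objective: faster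
-- what changed: B replaces A's removal phase (for each low-sum word, scan every pony and pop it) with a single rebuild pass that filters each pony's word dict against a precomputed set of removed words; the sub-5 sums are totalled in one pass with dict.get. B returns a new dict instead of mutating pony_wc in place (same return value).
import Mathlib
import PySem

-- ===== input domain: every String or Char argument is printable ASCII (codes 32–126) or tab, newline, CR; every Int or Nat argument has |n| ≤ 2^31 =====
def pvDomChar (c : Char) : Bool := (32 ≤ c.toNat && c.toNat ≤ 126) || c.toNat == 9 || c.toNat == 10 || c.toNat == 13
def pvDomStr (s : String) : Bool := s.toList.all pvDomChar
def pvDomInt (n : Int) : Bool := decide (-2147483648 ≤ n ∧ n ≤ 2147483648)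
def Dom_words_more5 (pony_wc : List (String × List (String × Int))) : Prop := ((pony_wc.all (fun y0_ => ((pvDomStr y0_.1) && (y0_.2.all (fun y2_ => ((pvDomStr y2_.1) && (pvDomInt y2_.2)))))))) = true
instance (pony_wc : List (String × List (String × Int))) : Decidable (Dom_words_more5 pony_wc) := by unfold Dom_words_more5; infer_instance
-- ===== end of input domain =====

-- B replaces A's per-sus-word scan over all ponies with one filtering pass against a
-- removed-word set (objective: faster).  A also mutates pony_wc in place and returns it;
-- B returns a fresh dict — the equivalence proved here is about the RETURN value only.

-- ===== PORT A =====
def words_more5 (pony_wc : List (String × List (String × Int))) : List (String × List (String × Int)) :=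
  let sus : PySem.Dict String Int :=
    pony_wc.foldl (fun sus pony =>
      pony.2.foldl (fun sus wc =>
        if wc.2 < 5 then
          if !(sus.contains wc.1) then sus.insert wc.1 wc.2
          else sus.modify wc.1 0 (· + wc.2)
        else sus) sus) PySem.Dict.empty
  sus.items.foldl (fun acc wv =>
    if wv.2 < 5 then
      acc.map (fun pony =>
        -- 'if word in pony_wc[pony]: pony_wc[pony].pop(word)' — pop under the membership guard = erase
        if (PySem.Dict.mk pony.2).contains wv.1 then
          (pony.1, ((PySem.Dict.mk pony.2).erase wv.1).items)
        else pony)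
    else acc) pony_wc

-- ===== PORT B =====
def words_more5_alt (pony_wc : List (String × List (String × Int))) : List (String × List (String × Int)) :=
  let sums : PySem.Dict String Int :=
    pony_wc.foldl (fun sums pony =>
      pony.2.foldl (fun sums wc =>
        if wc.2 < 5 then sums.insert wc.1 (sums.getD wc.1 0 + wc.2) else sums) sums) PySem.Dict.empty
  let removed : PySem.Set String :=
    PySem.Set.ofList ((sums.items.filter (fun p => p.2 < 5)).map (·.1))
  pony_wc.map (fun pony => (pony.1, pony.2.filter (fun wc => !(PySem.Set.contains removed wc.1))))

-- ===== PRECONDITION & SPEC =====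
def Spec_words_more5 (pony_wc : List (String × List (String × Int))) (out : List (String × List (String × Int))) : Prop := out = words_more5_alt pony_wc
instance (pony_wc : List (String × List (String × Int))) (out : List (String × List (String × Int))) : Decidable (Spec_words_more5 pony_wc out) := by unfold Spec_words_more5; infer_instance

-- ===== CLAIM (what is proved, stated in full; the proofs are below) =====
def Claim_equal_words_more5 : Prop := ∀ (pony_wc : List (String × List (String × Int))), Dom_words_more5 pony_wc → Spec_words_more5 pony_wc (words_more5 pony_wc)

-- ===== LEMMAS AND PROOFS =====

-- the two sus/sums accumulation steps agree on every state
lemma wm5_step_eq :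
    (fun (sus : PySem.Dict String Int) (wc : String × Int) =>
      if wc.2 < 5 then
        if !(sus.contains wc.1) then sus.insert wc.1 wc.2
        else sus.modify wc.1 0 (· + wc.2)
      else sus)
    = (fun (sus : PySem.Dict String Int) (wc : String × Int) =>
      if wc.2 < 5 then sus.insert wc.1 (sus.getD wc.1 0 + wc.2) else sus) := by
  funext sus wc
  by_cases h5 : wc.2 < 5
  · by_cases hc : sus.contains wc.1
    · simp [h5, hc, PySem.Dict.modify]
    · have h0 : sus.getD wc.1 0 = 0 :=
        PySem.Dict.getD_of_not_contains sus 0 (by simpa using hc)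
      simp [h5, hc, h0]
  · simp [h5]

-- removed words of a sus-items list
def wm5_rl (L : List (String × Int)) : List String := (L.filter (fun p => p.2 < 5)).map (·.1)

-- A's conditional pop of word w from one pony equals filtering w out
lemma wm5_pop_eq_filter (w : String) (pony : String × List (String × Int)) :
    (if (PySem.Dict.mk pony.2).contains w then
       (pony.1, ((PySem.Dict.mk pony.2).erase w).items)
     else pony)
    = (pony.1, pony.2.filter (fun wc => !(wc.1 == w))) := by
  by_cases hc : (PySem.Dict.mk pony.2).contains w
  · simp [hc, PySem.Dict.erase]
  · have hall : ∀ wc ∈ pony.2, (!(wc.1 == w)) = true := by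
      intro wc hwc
      have hne : ¬ (pony.2.any (fun p => p.1 == w) = true) := by
        simpa [PySem.Dict.contains] using hc
      simp only [List.any_eq_true, not_exists, not_and] at hne
      simpa using hne wc hwc
    simp [hc, List.filter_eq_self.mpr hall]

-- A's removal loop over L equals one filter against wm5_rl L, for every pony list
lemma wm5_fold_eq_filter (L : List (String × Int)) (pw : List (String × List (String × Int))) :
    L.foldl (fun acc wv =>
      if wv.2 < 5 then
        acc.map (fun pony =>
          if (PySem.Dict.mk pony.2).contains wv.1 then
            (pony.1, ((PySem.Dict.mk pony.2).erase wv.1).items)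
          else pony)
      else acc) pw
    = pw.map (fun pony => (pony.1, pony.2.filter (fun wc => !(decide (wc.1 ∈ wm5_rl L))))) := by
  induction L generalizing pw with
  | nil =>
      simp [wm5_rl]
  | cons hd tl ih =>
      by_cases h5 : hd.2 < 5
      · have hrl : wm5_rl (hd :: tl) = hd.1 :: wm5_rl tl := by
          simp [wm5_rl, h5]
        simp only [List.foldl_cons, if_pos h5]
        have hstep : pw.map (fun pony =>
            if (PySem.Dict.mk pony.2).contains hd.1 then
              (pony.1, ((PySem.Dict.mk pony.2).erase hd.1).items)
            else pony)
            = pw.map (fun pony => (pony.1, pony.2.filter (fun wc => !(wc.1 == hd.1)))) :=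
          List.map_congr_left (fun pony _ => wm5_pop_eq_filter hd.1 pony)
        rw [hstep, ih, List.map_map]
        refine List.map_congr_left ?_
        intro pony _
        simp only [Function.comp, hrl, List.filter_filter]
        congr 1
        refine List.filter_congr ?_
        intro wc _
        by_cases hw : wc.1 = hd.1 <;> simp [hw, List.mem_cons]
      · have hrl : wm5_rl (hd :: tl) = wm5_rl tl := by
          simp [wm5_rl, h5]
        simp only [List.foldl_cons, if_neg h5, ih, hrl]

-- membership in the removed set is list membership
lemma wm5_removed_contains (L : List String) (x : String) :
    PySem.Set.contains (PySem.Set.ofList L) x = decide (x ∈ L) := by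
  by_cases h : x ∈ L <;> simp [h, PySem.Set.mem_ofList]

-- ===== VERDICT (by name: the statement is the Claim_ definition above) =====
theorem words_more5_spec : Claim_equal_words_more5 := by
  intro pony_wc _
  show words_more5 pony_wc = words_more5_alt pony_wc
  unfold words_more5 words_more5_alt
  rw [wm5_step_eq, wm5_fold_eq_filter]
  refine List.map_congr_left ?_
  intro pony _
  congr 1
  refine List.filter_congr ?_
  intro wc _
  rw [show ((((pony_wc.foldl (fun sus pony =>
        pony.2.foldl (fun sus wc =>
          if wc.2 < 5 then sus.insert wc.1 (sus.getD wc.1 0 + wc.2) else sus) sus)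
        PySem.Dict.empty).items.filter (fun p => p.2 < 5)).map (·.1)))
      = wm5_rl (pony_wc.foldl (fun sus pony =>
        pony.2.foldl (fun sus wc =>
          if wc.2 < 5 then sus.insert wc.1 (sus.getD wc.1 0 + wc.2) else sus) sus)
        PySem.Dict.empty).items from rfl]
  rw [wm5_removed_contains]
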